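-- pv_equiv track=rewrite | github.com/tuoping/plot | mainplot_devi_errF.py | readcondidate
-- ===== SOURCE A (Python) =====
-- def readcondidate(context, num_y=1, skip_y=0):
--     x = []
--     y = []
--     for i in range(num_y):
--         y.append([])
--     for line in context:
--         c = line.split()
--         if len(c) < num_y+skip_y+1:
--             break
--         x.append(c[0])
--         for idx in range(skip_y+1, num_y+skip_y+1):
--             y[idx -1-skip_y].append(int(c[idx]))
--     return x,y
-- ===== SOURCE B (Python) =====
-- def readcondidate(context, num_y=1, skip_y=0):
--     x = []
--     rows = []
--     for line in context:
--         c = line.split()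
--         if len(c) < num_y + skip_y + 1:
--             break
--         x.append(c[0])
--         rows.append([int(c[j]) for j in range(skip_y + 1, num_y + skip_y + 1)])
--     y = [[row[k] for row in rows] for k in range(num_y)]
--     return x, y
-- ===== Notes on version B (the rewrite author's own statement) =====
-- stated objective: alternative
-- what changed: B gathers each valid line's selected integers into a row list and builds the columns afterwards by a single transpose comprehension, instead of A's per-line inner loop that appends into pre-built column lists via index arithmetic y[idx-1-skip_y].
import Mathlib
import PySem

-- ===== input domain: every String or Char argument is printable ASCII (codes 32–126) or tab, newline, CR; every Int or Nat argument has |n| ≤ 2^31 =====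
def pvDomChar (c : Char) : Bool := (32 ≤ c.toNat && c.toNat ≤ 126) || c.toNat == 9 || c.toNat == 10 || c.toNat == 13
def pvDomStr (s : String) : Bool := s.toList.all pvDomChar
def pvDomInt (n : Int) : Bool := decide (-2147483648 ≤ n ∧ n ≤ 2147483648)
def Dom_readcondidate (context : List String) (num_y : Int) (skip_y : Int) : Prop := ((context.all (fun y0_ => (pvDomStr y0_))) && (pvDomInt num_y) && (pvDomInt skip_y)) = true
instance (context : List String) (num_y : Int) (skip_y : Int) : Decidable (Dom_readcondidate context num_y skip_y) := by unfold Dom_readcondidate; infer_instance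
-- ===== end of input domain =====

-- B builds a row per valid line and transposes once at the end, instead of A's inner loop
-- appending into pre-built column lists via the index arithmetic y[idx-1-skip_y] (objective: alternative decomposition, same cost).

-- ===== PORT A =====
-- the 'for line in context' loop of A, with its break and the inner 'for idx in range(...)' fold
def readcondidateLoopA (num_y skip_y : Int) : List String → List String → List (List Int) → List String × List (List Int)
  | [], x, y => (x, y)
  | line :: rest, x, y =>
    let c := PySem.Str.split₀ line
    if ((c.length : Int)) < num_y + skip_y + 1 then (x, y)
    else
      readcondidateLoopA num_y skip_y rest
        (x ++ [PySem.List.pyGetD c 0 ""])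
        ((PySem.List.pyRange (skip_y + 1) (num_y + skip_y + 1) 1).foldl
          (fun yacc idx => PySem.List.pySetD yacc (idx - 1 - skip_y)
            (PySem.List.pyGetD yacc (idx - 1 - skip_y) [] ++
              [(PySem.Int.ofStr? (PySem.List.pyGetD c idx "")).getD 0])) y)

def readcondidate (context : List String) (num_y : Int) (skip_y : Int) : List String × List (List Int) :=
  -- x = []; y = []; for i in range(num_y): y.append([])
  readcondidateLoopA num_y skip_y context []
    ((PySem.List.pyRange 0 num_y 1).map (fun _ => ([] : List Int)))

-- ===== PORT B =====
-- [int(c[j]) for j in range(skip_y+1, num_y+skip_y+1)]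
def readcondidateRowB (num_y skip_y : Int) (c : List String) : List Int :=
  (PySem.List.pyRange (skip_y + 1) (num_y + skip_y + 1) 1).map
    (fun j => (PySem.Int.ofStr? (PySem.List.pyGetD c j "")).getD 0)

-- the 'for line in context' loop of B, collecting x and the rows table
def readcondidateLoopB (num_y skip_y : Int) : List String → List String → List (List Int) → List String × List (List Int)
  | [], x, rows => (x, rows)
  | line :: rest, x, rows =>
    let c := PySem.Str.split₀ line
    if ((c.length : Int)) < num_y + skip_y + 1 then (x, rows)
    else
      readcondidateLoopB num_y skip_y rest
        (x ++ [PySem.List.pyGetD c 0 ""])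
        (rows ++ [readcondidateRowB num_y skip_y c])

def readcondidate_alt (context : List String) (num_y : Int) (skip_y : Int) : List String × List (List Int) :=
  let p := readcondidateLoopB num_y skip_y context [] []
  -- y = [[row[k] for row in rows] for k in range(num_y)]
  (p.1, (PySem.List.pyRange 0 num_y 1).map
    (fun k => p.2.map (fun row => PySem.List.pyGetD row k 0)))

-- ===== PRECONDITION & SPEC =====
-- Pre_ excludes exactly the inputs on which A raises: a processed (pre-break) line whose split c
-- is empty (IndexError on c[0]), whose length does not cover the index range skip_y+1..num_y+skip_y
-- (IndexError on c[idx], negative indices counting from the end), or one of whose selected tokens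
-- (positions hit by those indices, after Python's negative-index wrap) is not int()-parseable
-- (ValueError). Stated over token positions of c so it is checkable without enumerating the range.
def Pre_readcondidate (context : List String) (num_y : Int) (skip_y : Int) : Prop :=
  ∀ line ∈ context.takeWhile
      (fun l => !decide ((((PySem.Str.split₀ l).length : Int)) < num_y + skip_y + 1)),
    PySem.Str.split₀ line ≠ [] ∧
    (num_y ≤ 0 ∨
      (-(((PySem.Str.split₀ line).length : Int)) ≤ skip_y + 1 ∧
        num_y + skip_y + 1 ≤ ((PySem.Str.split₀ line).length : Int))) ∧
    ∀ p ∈ List.range (PySem.Str.split₀ line).length,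
      ((skip_y + 1 ≤ (p : Int) ∧ (p : Int) < num_y + skip_y + 1) ∨
       (skip_y + 1 ≤ (p : Int) - ((PySem.Str.split₀ line).length : Int) ∧
        (p : Int) - ((PySem.Str.split₀ line).length : Int) < num_y + skip_y + 1)) →
      (PySem.Int.ofStr? ((PySem.Str.split₀ line).getD p "")).isSome

instance (context : List String) (num_y : Int) (skip_y : Int) : Decidable (Pre_readcondidate context num_y skip_y) := by unfold Pre_readcondidate; infer_instance

def pvWitness_readcondidate : List String × Int × Int := (["a 1 2", "b 3 4"], 2, 0)

def Spec_readcondidate (context : List String) (num_y : Int) (skip_y : Int) (out : List String × List (List Int)) : Prop := out = readcondidate_alt context num_y skip_y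
instance (context : List String) (num_y : Int) (skip_y : Int) (out : List String × List (List Int)) : Decidable (Spec_readcondidate context num_y skip_y out) := by unfold Spec_readcondidate; infer_instance

-- ===== CLAIM (what is proved, stated in full; the proofs are below) =====
def Claim_equal_readcondidate : Prop := ∀ (context : List String) (num_y : Int) (skip_y : Int), Dom_readcondidate context num_y skip_y → Pre_readcondidate context num_y skip_y → Spec_readcondidate context num_y skip_y (readcondidate context num_y skip_y)

-- ===== LEMMAS AND PROOFS =====

-- columns of a row table: what B computes from its rows at the end
def pvColsOf (num_y : Int) (rows : List (List Int)) : List (List Int) :=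
  (PySem.List.pyRange 0 num_y 1).map
    (fun k => rows.map (fun row => PySem.List.pyGetD row k 0))

-- inner fold of A, rebased to Nat indices 0..n-1 setting column k
lemma pv_foldl_set_append (v : Nat → Int) :
    ∀ (n : Nat) (y : List (List Int)), n ≤ y.length →
    (List.range n).foldl (fun acc k => acc.set k (acc.getD k [] ++ [v k])) y
      = (List.range y.length).map
          (fun k => if k < n then y.getD k [] ++ [v k] else y.getD k []) := by
  intro n
  induction n with
  | zero =>
    intro y _
    simp only [List.range_zero, List.foldl_nil, Nat.not_lt_zero, if_false]
    apply List.ext_getElem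
    · simp
    · intro i h1 h2
      simp only [List.length_map, List.length_range] at h2
      simp [List.getD_eq_getElem?_getD, List.getElem?_eq_getElem h2]
  | succ n ih =>
    intro y hn
    have hky : n < y.length := by omega
    rw [List.range_succ, List.foldl_append, ih y (by omega), List.foldl_cons, List.foldl_nil]
    have hM : (List.map (fun k => if k < n then y.getD k [] ++ [v k] else y.getD k [])
          (List.range y.length)).getD n []
        = y.getD n [] := by
      rw [List.getD_eq_getElem?_getD, List.getElem?_map, List.getElem?_range hky]
      simp
    rw [hM]
    apply List.ext_getElem
    · simp
    · intro i h1 h2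
      simp only [List.length_set, List.length_map, List.length_range] at h1
      rw [List.getElem_set]
      by_cases hik : n = i
      · subst hik
        simp
      · rw [if_neg hik]
        simp only [List.getElem_map, List.getElem_range]
        by_cases hlt : i < n
        · simp [hlt, Nat.lt_succ_of_lt hlt]
        · have h3 : ¬ i < n + 1 := by omega
          simp [hlt, h3]

-- A's per-line inner fold turns colsOf rows into colsOf (rows ++ [row])
lemma pv_step_cols (num_y skip_y : Int) (c : List String) (rows : List (List Int)) :
    (PySem.List.pyRange (skip_y + 1) (num_y + skip_y + 1) 1).foldl
        (fun yacc idx => PySem.List.pySetD yacc (idx - 1 - skip_y)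
          (PySem.List.pyGetD yacc (idx - 1 - skip_y) [] ++
            [(PySem.Int.ofStr? (PySem.List.pyGetD c idx "")).getD 0])) (pvColsOf num_y rows)
      = pvColsOf num_y (rows ++ [readcondidateRowB num_y skip_y c]) := by
  have e1 : num_y + skip_y + 1 - (skip_y + 1) = num_y := by ring
  unfold pvColsOf readcondidateRowB
  rw [PySem.List.pyRange_one (skip_y+1) (num_y+skip_y+1), e1,
      PySem.List.pyRange_one 0 num_y, List.foldl_map]
  simp only [Int.sub_zero, zero_add]
  have hfun : (fun (yacc : List (List Int)) (k : Nat) =>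
        PySem.List.pySetD yacc (skip_y + 1 + (k:Int) - 1 - skip_y)
          (PySem.List.pyGetD yacc (skip_y + 1 + (k:Int) - 1 - skip_y) [] ++
            [(PySem.Int.ofStr? (PySem.List.pyGetD c (skip_y + 1 + (k:Int)) "")).getD 0]))
      = (fun (acc : List (List Int)) (k : Nat) => acc.set k (acc.getD k [] ++
            [(PySem.Int.ofStr? (PySem.List.pyGetD c (skip_y + 1 + (k:Int)) "")).getD 0])) := by
    funext acc k
    have hk : skip_y + 1 + (k:Int) - 1 - skip_y = (k:Int) := by ring
    rw [hk]
    simp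
  rw [hfun, pv_foldl_set_append _ num_y.toNat _ (by simp)]
  simp only [List.map_map, List.length_map, List.length_range]
  apply List.map_congr_left
  intro k hk
  have hkn : k < num_y.toNat := List.mem_range.mp hk
  rw [if_pos hkn]
  rw [List.getD_eq_getElem?_getD, List.getElem?_map, List.getElem?_range hkn]
  simp only [Function.comp_apply, Option.map_some, Option.getD_some, List.map_append,
    List.map_cons, List.map_nil]
  congr 1
  rw [PySem.List.pyGetD_natCast]
  rw [List.getD_eq_getElem?_getD, List.getElem?_map, List.getElem?_range hkn]
  simp

lemma pv_loop_rel (num_y skip_y : Int) :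
    ∀ (lines : List String) (x : List String) (rows : List (List Int)),
    readcondidateLoopA num_y skip_y lines x (pvColsOf num_y rows)
      = ((readcondidateLoopB num_y skip_y lines x rows).1,
         pvColsOf num_y (readcondidateLoopB num_y skip_y lines x rows).2) := by
  intro lines
  induction lines with
  | nil => intro x rows; rfl
  | cons line rest ih =>
    intro x rows
    simp only [readcondidateLoopA, readcondidateLoopB]
    by_cases h : (((PySem.Str.split₀ line).length : Int)) < num_y + skip_y + 1
    · simp [h]
    · simp only [h, if_false]
      rw [pv_step_cols]
      exact ih _ _

-- ===== VERDICT (by name: the statement is the Claim_ definition above) =====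
theorem readcondidate_spec : Claim_equal_readcondidate := by
  intro context num_y skip_y _ _
  unfold Spec_readcondidate readcondidate readcondidate_alt
  have h0 : (PySem.List.pyRange 0 num_y 1).map (fun _ => ([] : List Int))
      = pvColsOf num_y [] := by simp [pvColsOf]
  rw [h0, pv_loop_rel]
  rfl
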